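-- pv_equiv track=rewrite | github.com/tomerofek/sing_sync | backend/song_db_-_python_scripts/main.py | advance_letter_in_url
-- ===== SOURCE A (Python) =====
-- def advance_letter_in_url(url):
--     broken_url = url.split('%')
--     letter_to_advance = broken_url[len(broken_url) - 1]
--     hex_value = int(letter_to_advance, 16)
--     hex_value = hex_value + 1
--     number_as_string = format(hex_value, 'X')
--     broken_url[len(broken_url) - 1] = number_as_string
--     new_url = ""
--     for string in broken_url:
--         new_url = new_url + string + '%'
--     return new_url[:-1]
-- ===== SOURCE B (Python) =====
-- def advance_letter_in_url(url):
--     i = url.rfind('%')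
--     return url[:i + 1] + format(int(url[i + 1:], 16) + 1, 'X')
-- ===== Notes on version B (the rewrite author's own statement) =====
-- stated objective: simpler
-- what changed: Instead of splitting the whole URL on every '%' into a list, rewriting its last element and re-joining with a loop plus a final strip, B locates only the last '%' with rfind and splices the incremented hex segment onto the untouched prefix in one expression.
import Mathlib
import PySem

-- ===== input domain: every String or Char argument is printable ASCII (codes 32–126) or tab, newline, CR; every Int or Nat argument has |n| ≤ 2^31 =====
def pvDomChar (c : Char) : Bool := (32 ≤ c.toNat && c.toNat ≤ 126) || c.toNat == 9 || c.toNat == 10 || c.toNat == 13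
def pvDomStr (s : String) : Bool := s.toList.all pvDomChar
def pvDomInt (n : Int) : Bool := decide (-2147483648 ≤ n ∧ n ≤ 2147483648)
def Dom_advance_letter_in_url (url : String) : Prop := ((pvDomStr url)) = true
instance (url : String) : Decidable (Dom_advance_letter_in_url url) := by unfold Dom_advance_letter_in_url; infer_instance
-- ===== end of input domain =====

-- B is simpler: instead of splitting the whole URL on every '%', rewriting the last list
-- element and re-joining with a loop plus a final strip, B locates only the last '%' with
-- rfind and splices the incremented hex segment onto the untouched prefix in one expression.
-- Equivalence is proved on the return value; neither program mutates its argument.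

-- shared helper: exact port of Python's format(v, 'X') (uppercase hex, '-' sign for negatives),
-- used by both ports because both Pythons call format(_, 'X')
def pyHexUpper (v : Int) : List Char :=
  if v < 0 then '-' :: (Nat.toDigits 16 v.natAbs).map PySem.Chars.upperChar
  else (Nat.toDigits 16 v.toNat).map PySem.Chars.upperChar

-- ===== PORT A =====
def advance_letter_in_url (url : String) : String :=
  let broken_url := PySem.Chars.splitOn url.toList ['%']
  match PySem.List.pyGet? broken_url (PySem.List.len broken_url - 1) with
  | none => ""   -- unreachable: split never returns an empty list
  | some letter_to_advance =>
    match PySem.Int.ofCharsBase? letter_to_advance 16 with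
    | none => ""  -- int(_, 16) raises ValueError: excluded by Pre_
    | some hex_value =>
      let hex_value2 := hex_value + 1
      let number_as_string := pyHexUpper hex_value2
      let broken_url2 := broken_url.set (broken_url.length - 1) number_as_string
      let new_url := broken_url2.foldl (fun acc s => acc ++ s ++ ['%']) []
      String.ofList (PySem.Chars.slice new_url none (some (-1)))

-- ===== PORT B =====
def advance_letter_in_url_alt (url : String) : String :=
  let cs := url.toList
  let i := PySem.Chars.rfind cs ['%']
  match PySem.Int.ofCharsBase? (PySem.Chars.slice cs (some (i + 1)) none) 16 with
  | none => ""  -- int(_, 16) raises ValueError: excluded by Pre_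
  | some v =>
    String.ofList (PySem.Chars.slice cs none (some (i + 1)) ++ pyHexUpper (v + 1))

-- ===== PRECONDITION & SPEC =====
-- Pre_ excludes exactly the inputs whose last '%'-segment is not a valid base-16 int literal,
-- on which Python A raises ValueError.
def Pre_advance_letter_in_url (url : String) : Prop :=
  (PySem.Int.ofCharsBase? ((url.toList.reverse.takeWhile (· != '%')).reverse) 16).isSome = true
instance (url : String) : Decidable (Pre_advance_letter_in_url url) := by
  unfold Pre_advance_letter_in_url; infer_instance

def pvWitness_advance_letter_in_url : String := "ab%1F"

def Spec_advance_letter_in_url (url : String) (out : String) : Prop := out = advance_letter_in_url_alt url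
instance (url : String) (out : String) : Decidable (Spec_advance_letter_in_url url out) := by unfold Spec_advance_letter_in_url; infer_instance

-- ===== CLAIM (what is proved, stated in full; the proofs are below) =====
def Claim_equal_advance_letter_in_url : Prop := ∀ (url : String), Dom_advance_letter_in_url url → Pre_advance_letter_in_url url → Spec_advance_letter_in_url url (advance_letter_in_url url)

-- ===== LEMMAS AND PROOFS =====

-- reference recursion computing split('%') segments
def segs : List Char → List (List Char)
  | [] => [[]]
  | c :: rest =>
    if c = '%' then [] :: segs rest
    else match segs rest with
      | [] => [[c]]
      | s :: ss => (c :: s) :: ss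

lemma segs_ne_nil (cs : List Char) : segs cs ≠ [] := by
  cases cs with
  | nil => simp [segs]
  | cons c rest =>
    simp only [segs]
    split <;> try simp
    split <;> simp

lemma splitOn_go_eq (fuel : Nat) : ∀ (l cur : List Char) (acc : List (List Char)),
    l.length ≤ fuel →
    PySem.Chars.splitOn.go ['%'] fuel l cur acc
      = acc.reverse ++ ((segs l).modifyHead (cur.reverse ++ ·)) := by
  induction fuel with
  | zero =>
    intro l cur acc h
    have : l = [] := by cases l <;> simp_all
    subst this
    simp [PySem.Chars.splitOn.go, segs]
  | succ fuel ih =>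
    intro l cur acc h
    cases l with
    | nil => simp [PySem.Chars.splitOn.go, segs]
    | cons c rest =>
      rw [PySem.Chars.splitOn.go]
      by_cases hc : c = '%'
      · subst hc
        simp only [List.isPrefixOf, beq_self_eq_true, Bool.true_and]
        rw [show List.drop ['%'].length ('%' :: rest) = rest from rfl]
        rw [ih rest [] (cur.reverse :: acc) (by simpa using Nat.le_of_succ_le_succ h)]
        rcases hseg : segs rest with _ | ⟨s, ss⟩
        · exact absurd hseg (segs_ne_nil rest)
        · simp [segs, hseg]
      · have hpre : (['%'].isPrefixOf (c :: rest)) = false := by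
          simp [List.isPrefixOf, Ne.symm hc]
        simp only [hpre, if_false, Bool.false_eq_true]
        rw [ih rest (c :: cur) acc (by simpa using Nat.le_of_succ_le_succ h)]
        rcases hseg : segs rest with _ | ⟨s, ss⟩
        · exact absurd hseg (segs_ne_nil rest)
        · simp [segs, hseg, hc]

lemma splitOn_eq_segs (cs : List Char) : PySem.Chars.splitOn cs ['%'] = segs cs := by
  rw [PySem.Chars.splitOn, splitOn_go_eq (cs.length + 1) cs [] [] (by omega)]
  rcases hseg : segs cs with _ | ⟨s, ss⟩
  · exact absurd hseg (segs_ne_nil cs)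
  · simp

-- equation lemmas for segs
lemma segs_pct (rest : List Char) : segs ('%' :: rest) = [] :: segs rest := by
  simp [segs]

lemma segs_cons {c : Char} (rest : List Char) (hc : c ≠ '%') {s : List Char}
    {ss : List (List Char)} (h : segs rest = s :: ss) :
    segs (c :: rest) = (c :: s) :: ss := by
  simp [segs, hc, h]

-- structure of the segments: they reconstruct cs and the last one is '%'-free
lemma segs_spec (cs : List Char) :
    ∃ pre last, segs cs = pre ++ [last]
      ∧ pre.flatMap (fun s => s ++ ['%']) ++ last = cs
      ∧ '%' ∉ last := by
  induction cs with
  | nil => exact ⟨[], [], by simp [segs], by simp, by simp⟩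
  | cons c rest ih =>
    obtain ⟨pre, last, h1, h2, h3⟩ := ih
    by_cases hc : c = '%'
    · subst hc
      refine ⟨[] :: pre, last, ?_, ?_, h3⟩
      · rw [segs_pct, h1]; rfl
      · simp [h2]
    · cases pre with
      | nil =>
        simp only [List.nil_append] at h1 h2
        refine ⟨[], c :: last, ?_, ?_, ?_⟩
        · rw [segs_cons rest hc h1]; rfl
        · simpa using h2
        · intro hm
          rcases List.mem_cons.mp hm with h4 | h4
          · exact hc h4.symm
          · exact h3 h4
      | cons p ps =>
        rw [List.cons_append] at h1
        refine ⟨(c :: p) :: ps, last, ?_, ?_, h3⟩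
        · rw [segs_cons rest hc h1]; rfl
        · simp only [List.flatMap_cons, List.cons_append, List.append_assoc] at h2 ⊢
          rw [← h2]

-- the concatenation of all non-last segments (each with its '%') is empty or ends in '%'
lemma flatMap_pct_shape (l : List (List Char)) :
    l.flatMap (fun s => s ++ ['%']) = [] ∨ ∃ Q, l.flatMap (fun s => s ++ ['%']) = Q ++ ['%'] := by
  induction l with
  | nil => left; simp
  | cons x l ih =>
    right
    rcases ih with h | ⟨Q, hQ⟩
    · exact ⟨x, by simp [h]⟩
    · exact ⟨x ++ ['%'] ++ Q, by simp [hQ]⟩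

lemma not_prefix_pct {xs : List Char} (h : '%' ∉ xs) : (['%'].isPrefixOf xs) = false := by
  cases xs with
  | nil => simp [List.isPrefixOf]
  | cons c t =>
    have hcne : c ≠ '%' := fun hc => h (hc ▸ List.mem_cons_self)
    simp [List.isPrefixOf, Ne.symm hcne]

lemma rfind_go_eq (P last : List Char) (hl : '%' ∉ last)
    (hp : P = [] ∨ ∃ Q, P = Q ++ ['%']) :
    ∀ j, P.length ≤ j + 1 →
      PySem.Chars.rfind.go (P ++ last) ['%'] j = (P.length : Int) - 1 := by
  intro j
  induction j with
  | zero =>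
    intro h
    rw [PySem.Chars.rfind.go]
    rcases hp with rfl | ⟨Q, rfl⟩
    · simp [not_prefix_pct hl]
    · have : Q = [] := by
        simp only [List.length_append] at h
        simp only [List.length_cons, List.length_nil] at h
        have : Q.length = 0 := by omega
        exact List.eq_nil_of_length_eq_zero this
      subst this
      simp [List.isPrefixOf]
  | succ j ih =>
    intro h
    rw [PySem.Chars.rfind.go]
    by_cases hc : P.length = j + 2
    · rcases hp with rfl | ⟨Q, rfl⟩
      · simp at hc
      · have hQ : Q.length = j + 1 := by
          simp only [List.length_append, List.length_singleton] at hc; omega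
        have hdrop : (Q ++ ['%'] ++ last).drop (j + 1) = '%' :: last := by
          rw [← hQ, List.append_assoc, List.drop_left]
          simp
        rw [hdrop]
        simp only [List.isPrefixOf, beq_self_eq_true, Bool.true_and,
          if_true]
        rw [hc]; push_cast; ring
    · have hle : P.length ≤ j + 1 := by omega
      have hdrop : (P ++ last).drop (j + 1) = last.drop (j + 1 - P.length) := by
        have heq : j + 1 = P.length + (j + 1 - P.length) := by omega
        rw [heq, List.drop_length_add_append]
        congr 1
        omega
      have hnp : '%' ∉ last.drop (j + 1 - P.length) := fun hm => hl (List.mem_of_mem_drop hm)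
      rw [hdrop, not_prefix_pct hnp]
      simpa using ih hle

-- the central decomposition: url = P ++ last with '%'-free last, P empty or ending in '%',
-- and both ports return String.ofList (P ++ pyHexUpper (v + 1)) where v parses last
lemma main_eq (url : String) (h : Pre_advance_letter_in_url url) :
    advance_letter_in_url url = advance_letter_in_url_alt url := by
  obtain ⟨preSegs, last, hsegs, hrec, hnp⟩ := segs_spec url.toList
  set cs := url.toList with hcs
  set P := preSegs.flatMap (fun s => s ++ ['%']) with hP
  have hPne : P = [] ∨ ∃ Q, P = Q ++ ['%'] := flatMap_pct_shape _
  -- Pre_'s expression is exactly `last`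
  have hpre_last : (cs.reverse.takeWhile (· != '%')).reverse = last := by
    have hall : ∀ a ∈ last.reverse, (a != '%') = true := by
      intro a ha
      have : a ∈ last := List.mem_reverse.mp ha
      simp only [bne_iff_ne, ne_eq]
      exact fun hc => hnp (hc ▸ this)
    calc (cs.reverse.takeWhile (· != '%')).reverse
        = ((last.reverse ++ P.reverse).takeWhile (· != '%')).reverse := by
          rw [← List.reverse_append, hrec]
      _ = (last.reverse ++ P.reverse.takeWhile (· != '%')).reverse := by
          rw [List.takeWhile_append_of_pos hall]
      _ = last := by
          rcases hPne with hP0 | ⟨Q, hQ⟩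
          · rw [hP0]; simp
          · rw [hQ]; simp
  obtain ⟨v, hv⟩ : ∃ v, PySem.Int.ofCharsBase? last 16 = some v := by
    unfold Pre_advance_letter_in_url at h
    rw [← hcs, hpre_last] at h
    exact Option.isSome_iff_exists.mp h
  -- ===== evaluate port A =====
  have hA : advance_letter_in_url url = String.ofList (P ++ pyHexUpper (v + 1)) := by
    unfold advance_letter_in_url
    rw [← hcs, splitOn_eq_segs, hsegs]
    have hidx : PySem.List.len (preSegs ++ [last]) - 1 = ((preSegs.length : Nat) : Int) := by
      simp only [PySem.List.len_eq, List.length_append, List.length_cons, List.length_nil]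
      push_cast; ring
    have key : PySem.List.pyGet? (preSegs ++ [last]) (PySem.List.len (preSegs ++ [last]) - 1)
        = some last := by
      rw [hidx]; exact PySem.List.pyGet?_append_length preSegs [] last
    simp only [key, hv]
    have hidx2 : (preSegs ++ [last]).length - 1 = preSegs.length := by simp
    rw [hidx2, List.set_append_right _ _ (by omega)]
    simp only [Nat.sub_self, List.set_cons_zero]
    have hfold : (preSegs ++ [pyHexUpper (v + 1)]).foldl
        (fun acc s => acc ++ s ++ ['%']) []
        = (preSegs ++ [pyHexUpper (v + 1)]).flatMap (fun s => s ++ ['%']) := by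
      rw [List.flatMap_eq_foldl]
      simp only [List.append_assoc]
    rw [hfold]
    simp only [List.flatMap_append, List.flatMap_cons, List.flatMap_nil, List.append_nil, ← hP]
    rw [PySem.Chars.slice_eq_listSlice, PySem.List.slice_to_neg_one]
    rw [show P ++ (pyHexUpper (v + 1) ++ ['%']) = (P ++ pyHexUpper (v + 1)) ++ ['%'] by simp,
      List.dropLast_concat]
  -- ===== evaluate port B =====
  have hB : advance_letter_in_url_alt url = String.ofList (P ++ pyHexUpper (v + 1)) := by
    unfold advance_letter_in_url_alt
    rw [← hcs]
    have hrfind : PySem.Chars.rfind cs ['%'] = (P.length : Int) - 1 := by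
      rw [PySem.Chars.rfind]
      conv_lhs => rw [← hrec]
      rw [rfind_go_eq P last hnp hPne (P ++ last).length (by simp only [List.length_append]; omega)]
    have h1 : (P.length : Int) - 1 + 1 = ((P.length : Nat) : Int) := by ring
    have hdrop : PySem.Chars.slice cs (some ((P.length : Nat) : Int)) none = last := by
      rw [PySem.Chars.slice_eq_listSlice, PySem.List.slice_from_natCast, ← hrec,
        List.drop_left]
    have htake : PySem.Chars.slice cs none (some ((P.length : Nat) : Int)) = P := by
      rw [PySem.Chars.slice_eq_listSlice, PySem.List.slice_to_natCast, ← hrec,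
        List.take_left]
    simp only [hrfind, h1, hdrop, hv, htake]
  rw [hA, hB]

-- ===== VERDICT (by name: the statement is the Claim_ definition above) =====
theorem advance_letter_in_url_spec : Claim_equal_advance_letter_in_url := by
  intro url _ hpre
  unfold Spec_advance_letter_in_url
  exact main_eq url hpre
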